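-- pv_equiv track=rewrite | github.com/uno2os3es/bin_feb | csshtmlpret.py | _props_grouper
-- ===== SOURCE A (Python) =====
-- import itertools
--
-- def _prioritify(line_of_css: str, css_props_text_as_list: tuple) -> tuple:
--     sorted_css_properties, groups_by_alphabetic_order = css_props_text_as_list
--     priority_integer, group_integer = 9999, 0
--     for css_property in sorted_css_properties:
--         if css_property.lower() == line_of_css.split(":", maxsplit=1)[0].lower().strip():
--             priority_integer = sorted_css_properties.index(css_property)
--             group_integer = groups_by_alphabetic_order[priority_integer]
--             break
--     return (priority_integer, group_integer)
--
-- def _props_grouper(props, pgs):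
--     if not props:
--         return props
--     props_pg = zip((_prioritify(prop, pgs) for prop in props), props, strict=False)
--     props_pg = sorted(props_pg, key=lambda item: item[0][1])
--     props_by_groups = (list(item[1]) for item in itertools.groupby(props_pg, key=lambda item: item[0][1]))
--     props_by_groups = (sorted(item, key=lambda item: item[0][0]) for item in props_by_groups)
--     props = []
--     for group in props_by_groups:
--         group = (item[1] for item in group)
--         props += group
--         props += ["\n"]
--     props.pop()
--     return props
-- ===== SOURCE B (Python) =====
-- def _prioritify(line_of_css: str, css_props_text_as_list: tuple) -> tuple:
--     sorted_css_properties, groups_by_alphabetic_order = css_props_text_as_list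
--     priority_integer, group_integer = 9999, 0
--     for css_property in sorted_css_properties:
--         if css_property.lower() == line_of_css.split(":", maxsplit=1)[0].lower().strip():
--             priority_integer = sorted_css_properties.index(css_property)
--             group_integer = groups_by_alphabetic_order[priority_integer]
--             break
--     return (priority_integer, group_integer)
--
-- def _props_grouper(props, pgs):
--     if not props:
--         return props
--     buckets = {}
--     for prop in props:
--         priority, group = _prioritify(prop, pgs)
--         buckets.setdefault(group, []).append((priority, prop))
--     out = []
--     for group in sorted(buckets):
--         if out:
--             out.append("\n")
--         out.extend(p for _, p in sorted(buckets[group], key=lambda t: t[0]))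
--     return out
-- ===== Notes on version B (the rewrite author's own statement) =====
-- stated objective: alternative
-- what changed: Replaced the global stable sort by group followed by itertools.groupby and a generator pipeline with a single bucketing pass into a dict keyed by group, then iterating the (few) distinct groups in sorted order and stably sorting each bucket by priority, inserting the '\n' separator between groups as they are emitted.
import Mathlib
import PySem

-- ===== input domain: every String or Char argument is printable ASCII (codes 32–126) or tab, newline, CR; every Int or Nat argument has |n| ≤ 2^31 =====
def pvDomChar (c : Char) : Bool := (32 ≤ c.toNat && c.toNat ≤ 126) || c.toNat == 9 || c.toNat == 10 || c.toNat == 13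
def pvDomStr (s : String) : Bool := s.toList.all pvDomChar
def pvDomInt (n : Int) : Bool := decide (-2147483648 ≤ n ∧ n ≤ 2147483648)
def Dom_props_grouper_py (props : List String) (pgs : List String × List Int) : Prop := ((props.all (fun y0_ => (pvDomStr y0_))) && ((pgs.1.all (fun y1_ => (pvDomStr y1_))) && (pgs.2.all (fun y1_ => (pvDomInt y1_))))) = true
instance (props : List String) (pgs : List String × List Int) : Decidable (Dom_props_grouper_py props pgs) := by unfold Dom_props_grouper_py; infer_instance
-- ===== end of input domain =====

-- B replaces A's global stable sort by group + itertools.groupby pipeline with a single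
-- bucketing pass into a dict keyed by group, then emits the distinct groups in sorted order
-- (each bucket stably sorted by priority) with "\n" between groups; alternative decomposition,
-- same asymptotic cost.


-- ===== PORT A =====
-- shared helper: line_of_css.split(":", maxsplit=1)[0].lower().strip()
def pvKey (line : String) : String :=
  PySem.Str.strip (PySem.Str.lower (((PySem.Str.splitMax? line ":" 1).getD []).headD ""))

-- the 'for css_property in sorted_css_properties: …' loop of _prioritify;
-- 'none' = the IndexError of groups_by_alphabetic_order[priority_integer]
def prioritifyLoop (key : String) (lst pgs1 : List String) (pgs2 : List Int) : Option (Int × Int) :=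
  match lst with
  | [] => some (9999, 0)
  | c :: rest =>
    if PySem.Str.lower c == key then
      match PySem.List.index? pgs1 c with
      | none => none
      | some pr =>
        match PySem.List.pyGet? pgs2 (pr : Int) with
        | none => none
        | some g => some ((pr : Int), g)
    else prioritifyLoop key rest pgs1 pgs2

-- _prioritify (shared by A and B, as in the Python); none = it raises IndexError
def prioritify (line : String) (pgs : List String × List Int) : Option (Int × Int) :=
  prioritifyLoop (pvKey line) pgs.1 pgs.1 pgs.2

-- collects the per-prop _prioritify results; none = some call raised (excluded by Pre_)
def pvAllSome {α : Type} : List (Option α) → Option (List α)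
  | [] => some []
  | none :: _ => none
  | some x :: t => (pvAllSome t).map (x :: ·)

-- itertools.groupby(_, key=lambda item: item[0][1]) as consecutive runs of equal group key
def pvGroupby (l : List ((Int × Int) × String)) : List (List ((Int × Int) × String)) :=
  match l with
  | [] => []
  | x :: xs =>
    (x :: xs.takeWhile (fun y => y.1.2 == x.1.2)) ::
      pvGroupby (xs.dropWhile (fun y => y.1.2 == x.1.2))
termination_by l.length
decreasing_by simpa using Nat.lt_succ_of_le (List.length_dropWhile_le _ xs)

def props_grouper_py (props : List String) (pgs : List String × List Int) : List String :=
  if props = [] then props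
  else
    match pvAllSome (props.map (fun p => prioritify p pgs)) with
    | none => []               -- a _prioritify call raised; outside Pre_
    | some vals =>
      (((pvGroupby (PySem.List.sorted (vals.zip props) (fun item => item.1.2))).map
          (fun grp => PySem.List.sorted grp (fun item => item.1.1))).foldl
        (fun acc grp => acc ++ grp.map (fun item => item.2) ++ ["\n"]) []).dropLast

-- ===== PORT B =====
def props_grouper_py_alt (props : List String) (pgs : List String × List Int) : List String :=
  if props = [] then props
  else
    match pvAllSome (props.map (fun p => prioritify p pgs)) with
    | none => []               -- a _prioritify call raised; outside Pre_
    | some vals =>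
      let buckets := (vals.zip props).foldl
        (fun d x => d.modify x.1.2 [] (fun b => b ++ [(x.1.1, x.2)])) PySem.Dict.empty
      (PySem.List.sorted buckets.keys (fun g => g)).foldl
        (fun out g =>
          (if out = [] then out else out ++ ["\n"]) ++
            (PySem.List.sorted (buckets.getD g []) (fun t => t.1)).map (fun t => t.2)) []

-- ===== PRECONDITION & SPEC =====
-- Pre_ excludes exactly the inputs on which _prioritify raises IndexError: some prop's css
-- key matches sorted_css_properties at an index beyond the end of groups_by_alphabetic_order.
def Pre_props_grouper_py (props : List String) (pgs : List String × List Int) : Prop :=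
  ∀ p ∈ props,
    ((pgs.1.findIdx? (fun c => PySem.Str.lower c == pvKey p)).all
      (fun i => decide (i < pgs.2.length))) = true
instance (props : List String) (pgs : List String × List Int) : Decidable (Pre_props_grouper_py props pgs) := by unfold Pre_props_grouper_py; infer_instance

def pvWitness_props_grouper_py : List String × (List String × List Int) :=
  (["color: red", "margin:0", "nonsense"], (["color", "margin"], [1, 0]))

def Spec_props_grouper_py (props : List String) (pgs : List String × List Int) (out : List String) : Prop := out = props_grouper_py_alt props pgs
instance (props : List String) (pgs : List String × List Int) (out : List String) : Decidable (Spec_props_grouper_py props pgs out) := by unfold Spec_props_grouper_py; infer_instance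

-- ===== CLAIM (what is proved, stated in full; the proofs are below) =====
def Claim_equal_props_grouper_py : Prop := ∀ (props : List String) (pgs : List String × List Int), Dom_props_grouper_py props pgs → Pre_props_grouper_py props pgs → Spec_props_grouper_py props pgs (props_grouper_py props pgs)

-- ===== LEMMAS AND PROOFS =====

-- the common canonical form both cores are proved equal to
def pvChunk (ps : List ((Int × Int) × String)) (g : Int) : List String :=
  (PySem.List.sorted (ps.filter (fun x => x.1.2 == g)) (fun x => x.1.1)).map (fun x => x.2)

def pvGroups (ps : List ((Int × Int) × String)) : List Int :=
  PySem.List.sorted (PySem.Set.ofList (ps.map (fun x => x.1.2))) (fun g => g)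

def pvCanon (ps : List ((Int × Int) × String)) : List String :=
  match pvGroups ps with
  | [] => []
  | g :: rest => pvChunk ps g ++ rest.flatMap (fun g => "\n" :: pvChunk ps g)

-- ---- A-side: stability of the sort by group under filtering by one group value ----
theorem pv_filter_insertBy (x : (Int × Int) × String) (acc : List ((Int × Int) × String)) (g : Int)
    (hs : acc.Pairwise (fun a b => a.1.2 ≤ b.1.2)) :
    (PySem.List.insertBy (fun a b => decide (a.1.2 < b.1.2)) x acc).filter (fun y => y.1.2 == g)
      = acc.filter (fun y => y.1.2 == g) ++ (if x.1.2 == g then [x] else []) := by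
  induction acc with
  | nil =>
    by_cases hxg : x.1.2 = g <;> simp [PySem.List.insertBy, hxg]
  | cons y ys ih =>
    rw [List.pairwise_cons] at hs
    by_cases hlt : x.1.2 < y.1.2
    · by_cases hxg : x.1.2 = g
      · have hnil : (y :: ys).filter (fun z => z.1.2 == g) = [] := by
          rw [List.filter_eq_nil_iff]
          intro z hz
          have hyz : y.1.2 ≤ z.1.2 := by
            rcases List.mem_cons.mp hz with rfl | hz
            · exact le_refl _
            · exact hs.1 z hz
          have : g < z.1.2 := lt_of_lt_of_le (hxg ▸ hlt) hyz
          simp [beq_iff_eq]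
          omega
        rw [show (PySem.List.insertBy (fun a b => decide (a.1.2 < b.1.2)) x (y :: ys))
            = x :: y :: ys from by simp [PySem.List.insertBy, hlt]]
        simp [hxg, hnil]
      · simp [PySem.List.insertBy, hlt, List.filter_cons, hxg]
    · simp only [PySem.List.insertBy, decide_eq_true_eq, if_neg hlt, List.filter_cons,
        ih hs.2]
      by_cases hyg : y.1.2 = g <;> simp [hyg]

theorem pv_stab_sorted (ps : List ((Int × Int) × String)) (g : Int) :
    (PySem.List.sorted ps (fun x => x.1.2)).filter (fun y => y.1.2 == g)
      = ps.filter (fun y => y.1.2 == g) := by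
  induction ps using List.reverseRecOn with
  | nil => rfl
  | append_singleton l x ih =>
    have hstep : PySem.List.sorted (l ++ [x]) (fun y => y.1.2)
        = PySem.List.insertBy (fun a b => decide (a.1.2 < b.1.2)) x
            (PySem.List.sorted l (fun y => y.1.2)) := by
      rw [PySem.List.sorted_eq_foldl_insertBy, List.foldl_append,
        ← PySem.List.sorted_eq_foldl_insertBy]
      rfl
    rw [hstep, pv_filter_insertBy x _ g (PySem.List.sorted_pairwise l (fun y => y.1.2)), ih,
      List.filter_append]
    by_cases hxg : x.1.2 = g <;> simp [hxg]

-- ---- ofList facts ----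
theorem pv_ofList_sublist (l : List Int) : (PySem.Set.ofList l).Sublist l := by
  induction l using List.reverseRecOn with
  | nil => simp [PySem.Set.ofList, PySem.Set.empty]
  | append_singleton t x ih =>
    show (List.foldl PySem.Set.add PySem.Set.empty (t ++ [x])).Sublist (t ++ [x])
    rw [List.foldl_append]
    show (PySem.Set.add (PySem.Set.ofList t) x).Sublist (t ++ [x])
    unfold PySem.Set.add
    split
    · exact ih.trans (List.sublist_append_left t [x])
    · exact List.Sublist.append ih (List.Sublist.refl [x])

theorem pv_ofList_pairwise_lt (l : List Int) (h : l.Pairwise (· ≤ ·)) :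
    (PySem.Set.ofList l).Pairwise (· < ·) := by
  have hle := h.sublist (pv_ofList_sublist l)
  have hne : (PySem.Set.ofList l).Pairwise (· ≠ ·) := PySem.Set.nodup_ofList l
  exact (hle.and hne).imp (fun hab => lt_of_le_of_ne hab.1 hab.2)

theorem pv_foldl_add_cons (d : List Int) (k : Int) (s : List Int) (hk : k ∉ d) :
    d.foldl PySem.Set.add (k :: s) = k :: d.foldl PySem.Set.add s := by
  induction d generalizing s with
  | nil => rfl
  | cons z t ih =>
    have hzk : ¬ z = k := fun hz => hk (hz ▸ List.mem_cons_self)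
    have hstep : PySem.Set.add (k :: s) z = k :: PySem.Set.add s z := by
      unfold PySem.Set.add PySem.Set.contains
      simp only [List.contains_cons]
      have : (z == k) = false := by simp [hzk]
      rw [this]
      split <;> simp_all
    simp only [List.foldl_cons, hstep]
    exact ih _ (fun hkt => hk (List.mem_cons_of_mem _ hkt))

-- ---- groupby on a list sorted by group key ----
theorem pv_lower_dropWhile (xs : List ((Int × Int) × String)) (k : Int)
    (hp : xs.Pairwise (fun a b => a.1.2 ≤ b.1.2)) (hb : ∀ z ∈ xs, k ≤ z.1.2) :
    ∀ z ∈ xs.dropWhile (fun y => y.1.2 == k), k < z.1.2 := by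
  induction xs with
  | nil => simp
  | cons y ys ih =>
    rw [List.pairwise_cons] at hp
    by_cases hy : y.1.2 = k
    · rw [List.dropWhile_cons_of_pos (by simp [hy])]
      exact ih hp.2 (fun z hz => hy ▸ hp.1 z hz)
    · rw [List.dropWhile_cons_of_neg (by simp [hy])]
      intro z hz
      rcases List.mem_cons.mp hz with rfl | hz
      · exact lt_of_le_of_ne (hb z List.mem_cons_self) (fun h => hy h.symm)
      · exact lt_of_lt_of_le
          (lt_of_le_of_ne (hb y List.mem_cons_self) (fun h => hy h.symm)) (hp.1 z hz)

theorem pv_groupby_eq (S : List ((Int × Int) × String))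
    (hp : S.Pairwise (fun a b => a.1.2 ≤ b.1.2)) :
    pvGroupby S
      = (PySem.Set.ofList (S.map (fun x => x.1.2))).map (fun g => S.filter (fun y => y.1.2 == g)) := by
  induction S using pvGroupby.induct with
  | case1 => simp [pvGroupby, PySem.Set.ofList, PySem.Set.empty]
  | case2 x xs ih =>
    rw [List.pairwise_cons] at hp
    have hpxs := hp.2
    have hbd := pv_lower_dropWhile xs x.1.2 hpxs hp.1
    have hpd : (xs.dropWhile (fun y => y.1.2 == x.1.2)).Pairwise (fun a b => a.1.2 ≤ b.1.2) :=
      hpxs.sublist (List.dropWhile_sublist _)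
    -- keys decompose: k :: t-keys ++ d-keys with t-keys all = k, k ∉ d-keys
    have hsplit : xs = xs.takeWhile (fun y => y.1.2 == x.1.2) ++ xs.dropWhile (fun y => y.1.2 == x.1.2) :=
      (List.takeWhile_append_dropWhile).symm
    have htk : ∀ z ∈ xs.takeWhile (fun y => y.1.2 == x.1.2), z.1.2 = x.1.2 := by
      intro z hz
      have := List.mem_takeWhile_imp hz
      simpa [beq_iff_eq] using this
    have hknotin : x.1.2 ∉ (xs.dropWhile (fun y => y.1.2 == x.1.2)).map (fun y => y.1.2) := by
      intro hmem
      rcases List.mem_map.mp hmem with ⟨z, hz, hzk⟩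
      exact absurd (hbd z hz) (by omega)
    have htfold : ∀ (T : List ((Int × Int) × String)), (∀ z ∈ T, z.1.2 = x.1.2) →
        (T.map (fun y => y.1.2)).foldl PySem.Set.add [x.1.2] = [x.1.2] := by
      intro T
      induction T with
      | nil => intro _; rfl
      | cons a t iht =>
        intro hT
        have ha := hT a List.mem_cons_self
        have hstep : PySem.Set.add [x.1.2] a.1.2 = [x.1.2] := by
          simp [PySem.Set.add, PySem.Set.contains, ha]
        simp only [List.map_cons, List.foldl_cons, hstep]
        exact iht (fun z hz => hT z (List.mem_cons_of_mem _ hz))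
    -- ofList of the key list
    have hofList : PySem.Set.ofList ((x :: xs).map (fun y => y.1.2))
        = x.1.2 :: PySem.Set.ofList ((xs.dropWhile (fun y => y.1.2 == x.1.2)).map (fun y => y.1.2)) := by
      have hmap : (x :: xs).map (fun y => y.1.2)
          = x.1.2 :: ((xs.takeWhile (fun y => y.1.2 == x.1.2)).map (fun y => y.1.2)
            ++ (xs.dropWhile (fun y => y.1.2 == x.1.2)).map (fun y => y.1.2)) := by
        rw [List.map_cons]
        congr 1
        rw [← List.map_append, List.takeWhile_append_dropWhile]
      rw [hmap]
      show List.foldl PySem.Set.add PySem.Set.empty _ = _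
      rw [List.foldl_cons]
      have hadd0 : PySem.Set.add PySem.Set.empty x.1.2 = [x.1.2] := rfl
      rw [hadd0, List.foldl_append, htfold _ htk]
      exact pv_foldl_add_cons _ _ _ hknotin
    rw [hofList, List.map_cons]
    rw [show pvGroupby (x :: xs)
        = (x :: xs.takeWhile (fun y => y.1.2 == x.1.2)) ::
            pvGroupby (xs.dropWhile (fun y => y.1.2 == x.1.2)) from by rw [pvGroupby]]
    congr 1
    · -- head chunk: (x :: xs).filter (== x.1.2) = x :: takeWhile
      have : (x :: xs).filter (fun y => y.1.2 == x.1.2)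
          = x :: (xs.takeWhile (fun y => y.1.2 == x.1.2)) := by
        rw [List.filter_cons_of_pos (by simp)]
        congr 1
        conv_lhs => rw [hsplit]
        rw [List.filter_append]
        have h1 : (xs.takeWhile (fun y => y.1.2 == x.1.2)).filter (fun y => y.1.2 == x.1.2)
            = xs.takeWhile (fun y => y.1.2 == x.1.2) := by
          rw [List.filter_eq_self]
          intro z hz; simp [htk z hz]
        have h2 : (xs.dropWhile (fun y => y.1.2 == x.1.2)).filter (fun y => y.1.2 == x.1.2) = [] := by
          rw [List.filter_eq_nil_iff]
          intro z hz
          have := hbd z hz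
          simp [beq_iff_eq]; omega
        rw [h1, h2, List.append_nil]
      exact this.symm
    · -- tail chunks: filtering (x :: xs) by g > x.1.2 ignores x and the takeWhile block
      rw [ih hpd]
      apply List.map_congr_left
      intro g hg
      have hgmem : g ∈ (xs.dropWhile (fun y => y.1.2 == x.1.2)).map (fun y => y.1.2) := by
        have := (PySem.Set.mem_ofList _ g).mp hg
        exact this
      have hxg : x.1.2 < g := by
        rcases List.mem_map.mp hgmem with ⟨z, hz, hzk⟩
        exact hzk ▸ hbd z hz
      rw [List.filter_cons_of_neg (by simp; omega)]
      conv_rhs => rw [hsplit]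
      rw [List.filter_append]
      have h1 : (xs.takeWhile (fun y => y.1.2 == x.1.2)).filter (fun y => y.1.2 == g) = [] := by
        rw [List.filter_eq_nil_iff]
        intro z hz
        have := htk z hz
        simp [beq_iff_eq]; omega
      rw [h1, List.nil_append]

-- ---- sorted groups of the sorted list = sorted dedup of the original groups ----
theorem pv_groups_eq (ps : List ((Int × Int) × String)) :
    PySem.Set.ofList ((PySem.List.sorted ps (fun x => x.1.2)).map (fun x => x.1.2)) = pvGroups ps := by
  unfold pvGroups
  refine (PySem.List.sorted_eq_of_perm_of_pairwise_lt _ _ (fun g => g) ?_ ?_).symm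
  · rw [List.perm_ext_iff_of_nodup (PySem.Set.nodup_ofList _) (PySem.Set.nodup_ofList _)]
    intro a
    rw [PySem.Set.mem_ofList, PySem.Set.mem_ofList]
    exact ((PySem.List.sorted_perm ps (fun x => x.1.2) false).map (fun x => x.1.2)).mem_iff
  · exact pv_ofList_pairwise_lt _ (PySem.List.sorted_map_key_pairwise ps (fun x => x.1.2))

-- ---- flatMap separator bookkeeping ----
theorem pv_flat_sep (C : Int → List String) (g : Int) (rest : List Int) :
    (g :: rest).flatMap (fun g => C g ++ ["\n"])
      = (C g ++ rest.flatMap (fun g => "\n" :: C g)) ++ ["\n"] := by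
  induction rest generalizing g with
  | nil => simp
  | cons h t ih =>
    rw [List.flatMap_cons, ih h]
    simp

theorem pv_sep_fold_aux (C : Int → List String) (L : List Int) (init : List String)
    (h : init ≠ []) :
    L.foldl (fun out g => (if out = [] then out else out ++ ["\n"]) ++ C g) init
      = init ++ L.flatMap (fun g => "\n" :: C g) := by
  induction L generalizing init with
  | nil => simp
  | cons g t ih =>
    rw [List.foldl_cons, if_neg h, ih _ (by simp), List.flatMap_cons]
    simp

-- ---- sorting pairs (priority, prop) commutes with forgetting the group ----
theorem pv_insertBy_map_pair (x : (Int × Int) × String) (acc : List ((Int × Int) × String)) :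
    PySem.List.insertBy (fun a b => decide (a.1 < b.1)) (x.1.1, x.2)
        (acc.map (fun y => (y.1.1, y.2)))
      = (PySem.List.insertBy (fun a b => decide (a.1.1 < b.1.1)) x acc).map (fun y => (y.1.1, y.2)) := by
  induction acc with
  | nil => rfl
  | cons y ys ih =>
    by_cases hlt : x.1.1 < y.1.1
    · simp [PySem.List.insertBy, hlt]
    · simp [PySem.List.insertBy, hlt, ih]

theorem pv_sorted_map_pair (l : List ((Int × Int) × String)) :
    PySem.List.sorted (l.map (fun x => (x.1.1, x.2))) (fun t => t.1)
      = (PySem.List.sorted l (fun x => x.1.1)).map (fun y => (y.1.1, y.2)) := by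
  have aux : ∀ (l : List ((Int × Int) × String)) (acc : List ((Int × Int) × String)),
      l.foldl (fun acc x => PySem.List.insertBy (fun a b => decide (a.1 < b.1)) (x.1.1, x.2) acc)
          (acc.map (fun y => (y.1.1, y.2)))
        = (l.foldl (fun acc x => PySem.List.insertBy (fun a b => decide (a.1.1 < b.1.1)) x acc)
            acc).map (fun y => (y.1.1, y.2)) := by
    intro l
    induction l with
    | nil => intro acc; rfl
    | cons x t ih =>
      intro acc
      rw [List.foldl_cons, List.foldl_cons, pv_insertBy_map_pair, ih]
  rw [PySem.List.sorted_eq_foldl_insertBy, PySem.List.sorted_eq_foldl_insertBy, List.foldl_map]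
  exact aux l []

-- ---- chunks are nonempty ----
theorem pv_chunk_ne_nil (ps : List ((Int × Int) × String)) (g : Int) (hg : g ∈ pvGroups ps) :
    pvChunk ps g ≠ [] := by
  unfold pvGroups at hg
  rw [PySem.List.mem_sorted, PySem.Set.mem_ofList, List.mem_map] at hg
  rcases hg with ⟨x, hx, rfl⟩
  have hmem : x ∈ ps.filter (fun y => y.1.2 == x.1.2) := List.mem_filter.mpr ⟨hx, by simp⟩
  have : ps.filter (fun y => y.1.2 == x.1.2) ≠ [] := List.ne_nil_of_mem hmem
  unfold pvChunk
  simp only [ne_eq, List.map_eq_nil_iff, PySem.List.sorted_eq_nil_iff]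
  exact this

theorem pv_sep_fold (C : Int → List String) (L : List Int) (h : ∀ g ∈ L, C g ≠ []) :
    L.foldl (fun out g => (if out = [] then out else out ++ ["\n"]) ++ C g) []
      = match L with
        | [] => []
        | g :: rest => C g ++ rest.flatMap (fun g => "\n" :: C g) := by
  cases L with
  | nil => rfl
  | cons g rest =>
    rw [List.foldl_cons]
    have hstep : (if ([] : List String) = [] then ([] : List String) else [] ++ ["\n"]) ++ C g
        = C g := by simp
    rw [hstep, pv_sep_fold_aux C rest (C g) (h g List.mem_cons_self)]

-- ---- the two cores ----
theorem pv_Acore (ps : List ((Int × Int) × String)) :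
    (((pvGroupby (PySem.List.sorted ps (fun item => item.1.2))).map
        (fun grp => PySem.List.sorted grp (fun item => item.1.1))).foldl
      (fun acc grp => acc ++ grp.map (fun item => item.2) ++ ["\n"]) []).dropLast = pvCanon ps := by
  have hpair : (PySem.List.sorted ps (fun x => x.1.2)).Pairwise (fun a b => a.1.2 ≤ b.1.2) :=
    PySem.List.sorted_pairwise ps (fun x => x.1.2)
  rw [pv_groupby_eq _ hpair, pv_groups_eq, List.map_map]
  have hmap : ((fun grp => PySem.List.sorted grp (fun item => item.1.1)) ∘
      (fun g => (PySem.List.sorted ps (fun x => x.1.2)).filter (fun y => y.1.2 == g)))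
      = fun g => PySem.List.sorted (ps.filter (fun y => y.1.2 == g)) (fun item => item.1.1) := by
    funext g
    simp only [Function.comp_apply, pv_stab_sorted]
  rw [hmap, List.foldl_map]
  have hbody : (fun (acc : List String) g =>
      acc ++ (PySem.List.sorted (ps.filter (fun y => y.1.2 == g)) (fun item => item.1.1)).map
        (fun item => item.2) ++ ["\n"])
      = fun acc g => acc ++ (pvChunk ps g ++ ["\n"]) := by
    funext acc g
    simp [pvChunk]
  rw [hbody, PySem.List.foldl_append_eq_flatMap]
  cases hL : pvGroups ps with
  | nil => simp [pvCanon, hL]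
  | cons g rest =>
    rw [List.nil_append, pv_flat_sep, List.dropLast_concat]
    simp [pvCanon, hL]

theorem pv_Bcore (ps : List ((Int × Int) × String)) :
    (PySem.List.sorted ((ps.foldl
        (fun d x => d.modify x.1.2 [] (fun b => b ++ [(x.1.1, x.2)])) PySem.Dict.empty).keys)
        (fun g => g)).foldl
      (fun out g =>
        (if out = [] then out else out ++ ["\n"]) ++
          (PySem.List.sorted ((ps.foldl
            (fun d x => d.modify x.1.2 [] (fun b => b ++ [(x.1.1, x.2)])) PySem.Dict.empty).getD g [])
            (fun t => t.1)).map (fun t => t.2)) [] = pvCanon ps := by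
  have hkeys : (ps.foldl (fun d x => d.modify x.1.2 [] (fun b => b ++ [(x.1.1, x.2)]))
        PySem.Dict.empty).keys = PySem.Set.ofList (ps.map (fun x => x.1.2)) := by
    rw [PySem.Dict.keys_foldl_modify_key ps (fun x => x.1.2) []
      (fun _ x b => b ++ [(x.1.1, x.2)]) PySem.Dict.empty, PySem.Dict.keys_empty]
    rfl
  have hgetD : ∀ g, (ps.foldl (fun d x => d.modify x.1.2 [] (fun b => b ++ [(x.1.1, x.2)]))
        PySem.Dict.empty).getD g []
      = (ps.filter (fun x => x.1.2 == g)).map (fun x => (x.1.1, x.2)) := by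
    intro g
    have h1 : ps.foldl (fun d x => d.modify x.1.2 [] (fun b => b ++ [(x.1.1, x.2)]))
          PySem.Dict.empty
        = (ps.map (fun x => (x.1.2, (x.1.1, x.2)))).foldl
            (fun d q => d.modify q.1 [] (fun b => b ++ [q.2])) PySem.Dict.empty := by
      rw [List.foldl_map]
    rw [h1, PySem.Dict.getD_foldl_modify_append, List.filter_map, List.map_map,
      PySem.Dict.getD_empty, List.nil_append]
    rfl
  have hbody : (fun (out : List String) g => (if out = [] then out else out ++ ["\n"]) ++
      (PySem.List.sorted ((ps.foldl (fun d x => d.modify x.1.2 [] (fun b => b ++ [(x.1.1, x.2)]))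
          PySem.Dict.empty).getD g []) (fun t => t.1)).map (fun t => t.2))
      = fun out g => (if out = [] then out else out ++ ["\n"]) ++ pvChunk ps g := by
    funext out g
    rw [hgetD g, pv_sorted_map_pair, List.map_map]
    rfl
  rw [hbody, hkeys,
    show PySem.List.sorted (PySem.Set.ofList (ps.map (fun x => x.1.2))) (fun g => g)
      = pvGroups ps from rfl,
    pv_sep_fold _ _ (fun g hg => pv_chunk_ne_nil ps g hg)]
  cases hL : pvGroups ps <;> simp [pvCanon, hL]

-- ===== VERDICT (by name: the statement is the Claim_ definition above) =====
theorem props_grouper_py_spec : Claim_equal_props_grouper_py := by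
  intro props pgs _ _
  unfold Spec_props_grouper_py props_grouper_py props_grouper_py_alt
  by_cases h : props = []
  · simp [h]
  · simp only [if_neg h]
    cases hv : pvAllSome (props.map (fun p => prioritify p pgs)) with
    | none => rfl
    | some vals =>
      dsimp only
      rw [pv_Acore, ← pv_Bcore (vals.zip props)]
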